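-- pv_equiv track=rewrite | github.com/Soham-Pasalkar/Cummins | app.py | categorize_parameter
-- ===== SOURCE A (Python) =====
-- def categorize_parameter(name: str) -> str:
--     p = name.lower()
--     if any(x in p for x in ['temp','thermal','ect','egt','iat','_t_','_t$']):
--         return "Temperature"
--     elif any(x in p for x in ['press','pres','map','boost','baro','_p_']):
--         return "Pressure"
--     elif any(x in p for x in ['speed','rpm','ckp','cmp','freq']):
--         return "Speed/RPM"
--     elif any(x in p for x in ['torque','load','trq']):
--         return "Torque/Load"
--     elif any(x in p for x in ['flow','maf','rate','mass']):
--         return "Flow/Rate"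
--     elif any(x in p for x in ['volt','current','power','elec','batt']):
--         return "Electrical"
--     elif any(x in p for x in ['nox','co2','hc','o2','soot','pm','emission','dpf','scr','urea']):
--         return "Emissions"
--     elif any(x in p for x in ['pos','tps','egr','valve','vgt','throttle']):
--         return "Position/Valve"
--     elif any(x in p for x in ['fuel','inj','rail']):
--         return "Fuel System"
--     elif any(x in p for x in ['knock','det']):
--         return "Knock"
--     elif any(x in p for x in ['lambda','afr','air']):
--         return "Air/Fuel"
--     elif any(x in p for x in ['cool','water','oil','lube']):
--         return "Cooling/Lubrication"
--     return "Other"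
-- ===== SOURCE B (Python) =====
-- # B: index the TEXT instead of scanning per keyword — enumerate the substrings of the
-- # lowercased name (lengths 1..8) and look each up in a precomputed keyword->(priority,label)
-- # dict, keeping the hit with the smallest priority; first-match priority of A's elif chain
-- # becomes "minimum priority over all hits".
-- _KW = {
--     'temp': (0, "Temperature"), 'thermal': (0, "Temperature"), 'ect': (0, "Temperature"),
--     'egt': (0, "Temperature"), 'iat': (0, "Temperature"), '_t_': (0, "Temperature"),
--     '_t$': (0, "Temperature"),
--     'press': (1, "Pressure"), 'pres': (1, "Pressure"), 'map': (1, "Pressure"),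
--     'boost': (1, "Pressure"), 'baro': (1, "Pressure"), '_p_': (1, "Pressure"),
--     'speed': (2, "Speed/RPM"), 'rpm': (2, "Speed/RPM"), 'ckp': (2, "Speed/RPM"),
--     'cmp': (2, "Speed/RPM"), 'freq': (2, "Speed/RPM"),
--     'torque': (3, "Torque/Load"), 'load': (3, "Torque/Load"), 'trq': (3, "Torque/Load"),
--     'flow': (4, "Flow/Rate"), 'maf': (4, "Flow/Rate"), 'rate': (4, "Flow/Rate"),
--     'mass': (4, "Flow/Rate"),
--     'volt': (5, "Electrical"), 'current': (5, "Electrical"), 'power': (5, "Electrical"),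
--     'elec': (5, "Electrical"), 'batt': (5, "Electrical"),
--     'nox': (6, "Emissions"), 'co2': (6, "Emissions"), 'hc': (6, "Emissions"),
--     'o2': (6, "Emissions"), 'soot': (6, "Emissions"), 'pm': (6, "Emissions"),
--     'emission': (6, "Emissions"), 'dpf': (6, "Emissions"), 'scr': (6, "Emissions"),
--     'urea': (6, "Emissions"),
--     'pos': (7, "Position/Valve"), 'tps': (7, "Position/Valve"), 'egr': (7, "Position/Valve"),
--     'valve': (7, "Position/Valve"), 'vgt': (7, "Position/Valve"), 'throttle': (7, "Position/Valve"),
--     'fuel': (8, "Fuel System"), 'inj': (8, "Fuel System"), 'rail': (8, "Fuel System"),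
--     'knock': (9, "Knock"), 'det': (9, "Knock"),
--     'lambda': (10, "Air/Fuel"), 'afr': (10, "Air/Fuel"), 'air': (10, "Air/Fuel"),
--     'cool': (11, "Cooling/Lubrication"), 'water': (11, "Cooling/Lubrication"),
--     'oil': (11, "Cooling/Lubrication"), 'lube': (11, "Cooling/Lubrication"),
-- }
-- _MAXLEN = 8
--
-- def _better(best, hit):
--     if hit is not None and (best is None or hit[0] < best[0]):
--         return hit
--     return best
--
-- def categorize_parameter(name: str) -> str:
--     p = name.lower()
--     best = None
--     for i in range(len(p)):
--         for l in range(1, _MAXLEN + 1):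
--             best = _better(best, _KW.get(p[i:i + l]))
--     return "Other" if best is None else best[1]
-- ===== Notes on version B (the rewrite author's own statement) =====
-- stated objective: alternative
-- what changed: Instead of testing each keyword against the name per category (elif chain of any(x in p) scans), B enumerates the substrings of the lowercased name (lengths 1..8), looks each up in a precomputed keyword->(priority,label) dict, and returns the label of the minimum-priority hit; chain first-match order becomes a minimum over priorities.
import Mathlib
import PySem

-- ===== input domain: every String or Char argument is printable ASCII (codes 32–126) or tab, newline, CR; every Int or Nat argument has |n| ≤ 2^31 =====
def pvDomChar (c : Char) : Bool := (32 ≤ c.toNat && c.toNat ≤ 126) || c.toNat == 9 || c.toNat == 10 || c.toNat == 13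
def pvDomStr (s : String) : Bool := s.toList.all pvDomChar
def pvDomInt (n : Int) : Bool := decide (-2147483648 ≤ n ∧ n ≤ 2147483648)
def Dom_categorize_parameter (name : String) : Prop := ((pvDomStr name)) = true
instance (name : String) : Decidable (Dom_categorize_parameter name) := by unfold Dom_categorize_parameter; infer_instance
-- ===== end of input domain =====

-- B indexes the text instead of scanning per keyword: it looks every substring (length 1..8)
-- of the lowercased name up in a keyword->(priority,label) dict and returns the label of the
-- minimum-priority hit; A's elif chain tests each category's keywords in order. Objective: alternative.

-- ===== PORT A =====
def categorize_parameter (name : String) : String :=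
  let p := PySem.Str.lower name
  if ["temp","thermal","ect","egt","iat","_t_","_t$"].any (fun x => PySem.Str.isIn x p) then "Temperature"
  else if ["press","pres","map","boost","baro","_p_"].any (fun x => PySem.Str.isIn x p) then "Pressure"
  else if ["speed","rpm","ckp","cmp","freq"].any (fun x => PySem.Str.isIn x p) then "Speed/RPM"
  else if ["torque","load","trq"].any (fun x => PySem.Str.isIn x p) then "Torque/Load"
  else if ["flow","maf","rate","mass"].any (fun x => PySem.Str.isIn x p) then "Flow/Rate"
  else if ["volt","current","power","elec","batt"].any (fun x => PySem.Str.isIn x p) then "Electrical"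
  else if ["nox","co2","hc","o2","soot","pm","emission","dpf","scr","urea"].any (fun x => PySem.Str.isIn x p) then "Emissions"
  else if ["pos","tps","egr","valve","vgt","throttle"].any (fun x => PySem.Str.isIn x p) then "Position/Valve"
  else if ["fuel","inj","rail"].any (fun x => PySem.Str.isIn x p) then "Fuel System"
  else if ["knock","det"].any (fun x => PySem.Str.isIn x p) then "Knock"
  else if ["lambda","afr","air"].any (fun x => PySem.Str.isIn x p) then "Air/Fuel"
  else if ["cool","water","oil","lube"].any (fun x => PySem.Str.isIn x p) then "Cooling/Lubrication"
  else "Other"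

-- ===== PORT B =====
def pvKW : PySem.Dict String (Int × String) := PySem.Dict.ofList
  [("temp", ((0 : Int), "Temperature")),
   ("thermal", ((0 : Int), "Temperature")),
   ("ect", ((0 : Int), "Temperature")),
   ("egt", ((0 : Int), "Temperature")),
   ("iat", ((0 : Int), "Temperature")),
   ("_t_", ((0 : Int), "Temperature")),
   ("_t$", ((0 : Int), "Temperature")),
   ("press", ((1 : Int), "Pressure")),
   ("pres", ((1 : Int), "Pressure")),
   ("map", ((1 : Int), "Pressure")),
   ("boost", ((1 : Int), "Pressure")),
   ("baro", ((1 : Int), "Pressure")),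
   ("_p_", ((1 : Int), "Pressure")),
   ("speed", ((2 : Int), "Speed/RPM")),
   ("rpm", ((2 : Int), "Speed/RPM")),
   ("ckp", ((2 : Int), "Speed/RPM")),
   ("cmp", ((2 : Int), "Speed/RPM")),
   ("freq", ((2 : Int), "Speed/RPM")),
   ("torque", ((3 : Int), "Torque/Load")),
   ("load", ((3 : Int), "Torque/Load")),
   ("trq", ((3 : Int), "Torque/Load")),
   ("flow", ((4 : Int), "Flow/Rate")),
   ("maf", ((4 : Int), "Flow/Rate")),
   ("rate", ((4 : Int), "Flow/Rate")),
   ("mass", ((4 : Int), "Flow/Rate")),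
   ("volt", ((5 : Int), "Electrical")),
   ("current", ((5 : Int), "Electrical")),
   ("power", ((5 : Int), "Electrical")),
   ("elec", ((5 : Int), "Electrical")),
   ("batt", ((5 : Int), "Electrical")),
   ("nox", ((6 : Int), "Emissions")),
   ("co2", ((6 : Int), "Emissions")),
   ("hc", ((6 : Int), "Emissions")),
   ("o2", ((6 : Int), "Emissions")),
   ("soot", ((6 : Int), "Emissions")),
   ("pm", ((6 : Int), "Emissions")),
   ("emission", ((6 : Int), "Emissions")),
   ("dpf", ((6 : Int), "Emissions")),
   ("scr", ((6 : Int), "Emissions")),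
   ("urea", ((6 : Int), "Emissions")),
   ("pos", ((7 : Int), "Position/Valve")),
   ("tps", ((7 : Int), "Position/Valve")),
   ("egr", ((7 : Int), "Position/Valve")),
   ("valve", ((7 : Int), "Position/Valve")),
   ("vgt", ((7 : Int), "Position/Valve")),
   ("throttle", ((7 : Int), "Position/Valve")),
   ("fuel", ((8 : Int), "Fuel System")),
   ("inj", ((8 : Int), "Fuel System")),
   ("rail", ((8 : Int), "Fuel System")),
   ("knock", ((9 : Int), "Knock")),
   ("det", ((9 : Int), "Knock")),
   ("lambda", ((10 : Int), "Air/Fuel")),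
   ("afr", ((10 : Int), "Air/Fuel")),
   ("air", ((10 : Int), "Air/Fuel")),
   ("cool", ((11 : Int), "Cooling/Lubrication")),
   ("water", ((11 : Int), "Cooling/Lubrication")),
   ("oil", ((11 : Int), "Cooling/Lubrication")),
   ("lube", ((11 : Int), "Cooling/Lubrication"))]

-- Source B's _better: keep the hit, if any, when it beats the best so far
def pvBetter (best : Option (Int × String)) (hit : Option (Int × String)) :
    Option (Int × String) :=
  match hit with
  | some h =>
      match best with
      | none => some h
      | some b => if h.1 < b.1 then some h else some b
  | none => best

def categorize_parameter_alt (name : String) : String :=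
  let p := PySem.Str.lower name
  let best := (PySem.List.pyRange 0 (PySem.Str.len p) 1).foldl
    (fun best i => (PySem.List.pyRange 1 9 1).foldl
      (fun best l => pvBetter best (pvKW.get? (PySem.Str.slice p (some i) (some (i + l)))))
      best) none
  match best with
  | none => "Other"
  | some b => b.2

-- ===== PRECONDITION & SPEC =====
def Spec_categorize_parameter (name : String) (out : String) : Prop := out = categorize_parameter_alt name
instance (name : String) (out : String) : Decidable (Spec_categorize_parameter name out) := by
  unfold Spec_categorize_parameter; infer_instance

-- ===== CLAIM =====
def Claim_equal_categorize_parameter : Prop :=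
  ∀ (name : String), Dom_categorize_parameter name → Spec_categorize_parameter name (categorize_parameter name)

-- ===== LEMMAS AND PROOFS =====

-- the dict's entries as a plain list (proof-side view of pvKW)
def pvItems : List (String × Int × String) :=
  [("temp", ((0 : Int), "Temperature")),
   ("thermal", ((0 : Int), "Temperature")),
   ("ect", ((0 : Int), "Temperature")),
   ("egt", ((0 : Int), "Temperature")),
   ("iat", ((0 : Int), "Temperature")),
   ("_t_", ((0 : Int), "Temperature")),
   ("_t$", ((0 : Int), "Temperature")),
   ("press", ((1 : Int), "Pressure")),
   ("pres", ((1 : Int), "Pressure")),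
   ("map", ((1 : Int), "Pressure")),
   ("boost", ((1 : Int), "Pressure")),
   ("baro", ((1 : Int), "Pressure")),
   ("_p_", ((1 : Int), "Pressure")),
   ("speed", ((2 : Int), "Speed/RPM")),
   ("rpm", ((2 : Int), "Speed/RPM")),
   ("ckp", ((2 : Int), "Speed/RPM")),
   ("cmp", ((2 : Int), "Speed/RPM")),
   ("freq", ((2 : Int), "Speed/RPM")),
   ("torque", ((3 : Int), "Torque/Load")),
   ("load", ((3 : Int), "Torque/Load")),
   ("trq", ((3 : Int), "Torque/Load")),
   ("flow", ((4 : Int), "Flow/Rate")),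
   ("maf", ((4 : Int), "Flow/Rate")),
   ("rate", ((4 : Int), "Flow/Rate")),
   ("mass", ((4 : Int), "Flow/Rate")),
   ("volt", ((5 : Int), "Electrical")),
   ("current", ((5 : Int), "Electrical")),
   ("power", ((5 : Int), "Electrical")),
   ("elec", ((5 : Int), "Electrical")),
   ("batt", ((5 : Int), "Electrical")),
   ("nox", ((6 : Int), "Emissions")),
   ("co2", ((6 : Int), "Emissions")),
   ("hc", ((6 : Int), "Emissions")),
   ("o2", ((6 : Int), "Emissions")),
   ("soot", ((6 : Int), "Emissions")),
   ("pm", ((6 : Int), "Emissions")),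
   ("emission", ((6 : Int), "Emissions")),
   ("dpf", ((6 : Int), "Emissions")),
   ("scr", ((6 : Int), "Emissions")),
   ("urea", ((6 : Int), "Emissions")),
   ("pos", ((7 : Int), "Position/Valve")),
   ("tps", ((7 : Int), "Position/Valve")),
   ("egr", ((7 : Int), "Position/Valve")),
   ("valve", ((7 : Int), "Position/Valve")),
   ("vgt", ((7 : Int), "Position/Valve")),
   ("throttle", ((7 : Int), "Position/Valve")),
   ("fuel", ((8 : Int), "Fuel System")),
   ("inj", ((8 : Int), "Fuel System")),
   ("rail", ((8 : Int), "Fuel System")),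
   ("knock", ((9 : Int), "Knock")),
   ("det", ((9 : Int), "Knock")),
   ("lambda", ((10 : Int), "Air/Fuel")),
   ("afr", ((10 : Int), "Air/Fuel")),
   ("air", ((10 : Int), "Air/Fuel")),
   ("cool", ((11 : Int), "Cooling/Lubrication")),
   ("water", ((11 : Int), "Cooling/Lubrication")),
   ("oil", ((11 : Int), "Cooling/Lubrication")),
   ("lube", ((11 : Int), "Cooling/Lubrication"))]

-- one min-keeping step on a sure hit
def pvMinStep (b : Option (Int × String)) (h : Int × String) : Option (Int × String) :=
  pvBetter b (some h)

-- all dict hits B's double loop encounters, as one flat list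
def pvHits (p : String) : List (Int × String) :=
  (PySem.List.pyRange 0 (PySem.Str.len p) 1).flatMap
    (fun i => (PySem.List.pyRange 1 9 1).filterMap
      (fun l => pvKW.get? (PySem.Str.slice p (some i) (some (i + l)))))

-- the first true branch of A's chain, as the (priority, label) it selects
def pvSel (p : String) : Option (Int × String) :=
  if ["temp","thermal","ect","egt","iat","_t_","_t$"].any (fun x => PySem.Str.isIn x p) then some ((0 : Int), "Temperature")
  else if ["press","pres","map","boost","baro","_p_"].any (fun x => PySem.Str.isIn x p) then some ((1 : Int), "Pressure")
  else if ["speed","rpm","ckp","cmp","freq"].any (fun x => PySem.Str.isIn x p) then some ((2 : Int), "Speed/RPM")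
  else if ["torque","load","trq"].any (fun x => PySem.Str.isIn x p) then some ((3 : Int), "Torque/Load")
  else if ["flow","maf","rate","mass"].any (fun x => PySem.Str.isIn x p) then some ((4 : Int), "Flow/Rate")
  else if ["volt","current","power","elec","batt"].any (fun x => PySem.Str.isIn x p) then some ((5 : Int), "Electrical")
  else if ["nox","co2","hc","o2","soot","pm","emission","dpf","scr","urea"].any (fun x => PySem.Str.isIn x p) then some ((6 : Int), "Emissions")
  else if ["pos","tps","egr","valve","vgt","throttle"].any (fun x => PySem.Str.isIn x p) then some ((7 : Int), "Position/Valve")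
  else if ["fuel","inj","rail"].any (fun x => PySem.Str.isIn x p) then some ((8 : Int), "Fuel System")
  else if ["knock","det"].any (fun x => PySem.Str.isIn x p) then some ((9 : Int), "Knock")
  else if ["lambda","afr","air"].any (fun x => PySem.Str.isIn x p) then some ((10 : Int), "Air/Fuel")
  else if ["cool","water","oil","lube"].any (fun x => PySem.Str.isIn x p) then some ((11 : Int), "Cooling/Lubrication")
  else none

set_option maxRecDepth 100000 in
lemma pvKW_items : pvKW.items = pvItems := by decide

set_option maxRecDepth 100000 in
lemma pvKW_nodup : pvKW.keys.Nodup := by decide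

lemma pvInner_eq (f : Int → Option (Int × String)) (xs : List Int) :
    ∀ (b : Option (Int × String)),
      xs.foldl (fun best l => pvBetter best (f l)) b = (xs.filterMap f).foldl pvMinStep b := by
  induction xs with
  | nil => intro b; rfl
  | cons x xs ih =>
    intro b
    cases hf : f x with
    | none =>
      have h1 : List.filterMap f (x :: xs) = List.filterMap f xs := by
        simp [hf]
      rw [List.foldl_cons, h1, show pvBetter b (f x) = b by rw [hf]; rfl]
      exact ih b
    | some h =>
      have h1 : List.filterMap f (x :: xs) = h :: List.filterMap f xs := by
        simp [hf]
      rw [List.foldl_cons, h1, List.foldl_cons,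
        show pvBetter b (f x) = pvMinStep b h by rw [hf]; rfl]
      exact ih _

-- B's nested folds compute the fold of pvMinStep over the flat hit list
lemma pvNested_eq (p : String) :
    (PySem.List.pyRange 0 (PySem.Str.len p) 1).foldl
      (fun best i => (PySem.List.pyRange 1 9 1).foldl
        (fun best l => pvBetter best (pvKW.get? (PySem.Str.slice p (some i) (some (i + l)))))
        best) none
      = (pvHits p).foldl pvMinStep none := by
  unfold pvHits
  rw [List.foldl_flatMap]
  simp only [pvInner_eq]

lemma pvFold_some (H : List (Int × String)) :
    ∀ (b : Int × String), ∃ c, H.foldl pvMinStep (some b) = some c ∧ c ∈ b :: H ∧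
      ∀ h ∈ b :: H, c.1 ≤ h.1 := by
  induction H with
  | nil => exact fun b => ⟨b, rfl, by simp, by simp⟩
  | cons h t ih =>
    intro b
    by_cases hlt : h.1 < b.1
    · obtain ⟨c, hc, hmem, hmin⟩ := ih h
      refine ⟨c, ?_, ?_, ?_⟩
      · rw [List.foldl_cons, show pvMinStep (some b) h = some h by
          simp [pvMinStep, pvBetter, hlt]]
        exact hc
      · simp only [List.mem_cons] at hmem ⊢
        tauto
      · intro x hx
        simp only [List.mem_cons] at hx
        have hch := hmin h (by simp)
        rcases hx with rfl | rfl | hx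
        · omega
        · exact hch
        · exact hmin x (by simp [hx])
    · obtain ⟨c, hc, hmem, hmin⟩ := ih b
      refine ⟨c, ?_, ?_, ?_⟩
      · rw [List.foldl_cons, show pvMinStep (some b) h = some b by
          simp [pvMinStep, pvBetter, hlt]]
        exact hc
      · simp only [List.mem_cons] at hmem ⊢
        tauto
      · intro x hx
        simp only [List.mem_cons] at hx
        have hcb := hmin b (by simp)
        rcases hx with rfl | rfl | hx
        · exact hcb
        · omega
        · exact hmin x (by simp [hx])

-- the fold returns the unique minimum-priority hit
lemma pvFold_eq_of_min (H : List (Int × String)) (q : Int × String)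
    (hq : q ∈ H) (hmin : ∀ h ∈ H, q.1 ≤ h.1)
    (huniq : ∀ h ∈ H, h.1 = q.1 → h = q) :
    H.foldl pvMinStep none = some q := by
  cases H with
  | nil => cases hq
  | cons h t =>
    obtain ⟨c, hc, hmem, hm⟩ := pvFold_some t h
    have hfold : (h :: t).foldl pvMinStep none = t.foldl pvMinStep (some h) := rfl
    have hcq : c = q := huniq c hmem (le_antisymm (hm q hq) (hmin c hmem))
    rw [hfold, hc, hcq]

-- substrings of length 1..8 found at some start index are exactly the infix keywords
lemma pvSlice_hit_iff (p kw : String) (h1 : 1 ≤ kw.toList.length) (h8 : kw.toList.length ≤ 8) :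
    (∃ i ∈ PySem.List.pyRange 0 (PySem.Str.len p) 1, ∃ l ∈ PySem.List.pyRange 1 9 1,
        PySem.Str.slice p (some i) (some (i + l)) = kw) ↔ PySem.Str.isIn kw p = true := by
  constructor
  · rintro ⟨i, hi, l, hl, hs⟩
    rw [PySem.List.mem_pyRange_one] at hi hl
    rw [PySem.Str.isIn_iff_infix]
    have hT := congrArg String.toList hs
    rw [PySem.Str.toList_slice, PySem.Chars.slice_eq_listSlice] at hT
    obtain ⟨a, rfl⟩ := Int.eq_ofNat_of_zero_le hi.1
    obtain ⟨n, rfl⟩ := Int.eq_ofNat_of_zero_le (by omega : (0 : Int) ≤ l)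
    rw [PySem.List.slice_natCast_add] at hT
    rw [← hT]
    exact ((List.take_prefix n _).isInfix).trans (List.drop_suffix a _).isInfix
  · intro hin
    rw [PySem.Str.isIn_iff_infix] at hin
    obtain ⟨j, hpre⟩ := (PySem.Chars.exists_prefix_drop_iff_isIn kw.toList p.toList).2
      ((PySem.Chars.isIn_iff_infix _ _).2 hin)
    have hjlt : j < p.toList.length := by
      by_contra hge
      have hnil : p.toList.drop j = [] := List.drop_eq_nil_of_le (by omega)
      rw [hnil] at hpre
      have hlen := List.IsPrefix.length_le hpre
      simp only [List.length_nil] at hlen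
      omega
    refine ⟨(j : Int), ?_, (kw.toList.length : Int), ?_, ?_⟩
    · rw [PySem.List.mem_pyRange_one, PySem.Str.len_eq]
      exact ⟨by omega, by exact_mod_cast hjlt⟩
    · rw [PySem.List.mem_pyRange_one]
      omega
    · rw [← String.toList_inj, PySem.Str.toList_slice, PySem.Chars.slice_eq_listSlice,
        PySem.List.slice_natCast_add]
      rw [List.prefix_iff_eq_take] at hpre
      exact hpre.symm

-- every keyword in the table has length 1..8
set_option maxRecDepth 100000 in
lemma pvItems_len : ∀ e ∈ pvItems, 1 ≤ e.1.toList.length ∧ e.1.toList.length ≤ 8 := by decide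

lemma mem_pvHits_iff (p : String) (h : Int × String) :
    h ∈ pvHits p ↔ ∃ kw, (kw, h) ∈ pvItems ∧ PySem.Str.isIn kw p = true := by
  unfold pvHits
  simp only [List.mem_flatMap, List.mem_filterMap]
  constructor
  · rintro ⟨i, hi, l, hl, hget⟩
    rw [PySem.Dict.get?_eq_some_iff_mem_items _ _ _ pvKW_nodup, pvKW_items] at hget
    refine ⟨_, hget, ?_⟩
    obtain ⟨hk1, hk8⟩ := pvItems_len _ hget
    exact (pvSlice_hit_iff p _ hk1 hk8).1 ⟨i, hi, l, hl, rfl⟩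
  · rintro ⟨kw, hmem, hin⟩
    obtain ⟨hk1, hk8⟩ := pvItems_len _ hmem
    obtain ⟨i, hi, l, hl, hs⟩ := (pvSlice_hit_iff p kw hk1 hk8).2 hin
    exact ⟨i, hi, l, hl, by
      rw [hs, PySem.Dict.get?_eq_some_iff_mem_items _ _ _ pvKW_nodup, pvKW_items]
      exact hmem⟩

lemma pvHit_of_matched (p : String) (j : Int) (lbl : String) (kws : List String)
    (hb : ∀ kw ∈ kws, (kw, (j, lbl)) ∈ pvItems)
    (hm : kws.any (fun x => PySem.Str.isIn x p) = true) : ((j, lbl)) ∈ pvHits p := by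
  obtain ⟨kw, hkw, hin⟩ := List.any_eq_true.1 hm
  exact (mem_pvHits_iff p _).2 ⟨kw, hb kw hkw, hin⟩

lemma pvNo_hit_of_not_matched (p : String) (j : Int) (kws : List String)
    (hf : ∀ e ∈ pvItems, e.2.1 = j → e.1 ∈ kws)
    (hm : kws.any (fun x => PySem.Str.isIn x p) = false) :
    ∀ h ∈ pvHits p, h.1 ≠ j := by
  intro h hh hj
  obtain ⟨kw, hmem, hin⟩ := (mem_pvHits_iff p h).1 hh
  exact (List.any_eq_false.1 hm kw (hf (kw, h) hmem hj)) hin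

lemma pvHit_uniq (p : String) (j : Int) (lbl : String)
    (hf : ∀ e ∈ pvItems, e.2.1 = j → e.2 = (j, lbl)) :
    ∀ h ∈ pvHits p, h.1 = j → h = (j, lbl) := by
  intro h hh hj
  obtain ⟨kw, hmem, _⟩ := (mem_pvHits_iff p h).1 hh
  exact hf (kw, h) hmem hj

lemma pvPrio_nonneg (p : String) : ∀ h ∈ pvHits p, 0 ≤ h.1 := by
  intro h hh
  obtain ⟨kw, hmem, _⟩ := (mem_pvHits_iff p h).1 hh
  have hall : ∀ e ∈ pvItems, 0 ≤ e.2.1 := by decide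
  exact hall (kw, h) hmem

lemma pvPrio_lt12 (p : String) : ∀ h ∈ pvHits p, h.1 < 12 := by
  intro h hh
  obtain ⟨kw, hmem, _⟩ := (mem_pvHits_iff p h).1 hh
  have hall : ∀ e ∈ pvItems, e.2.1 < 12 := by decide
  exact hall (kw, h) hmem

set_option maxRecDepth 100000 in
lemma pvMain (p : String) : (pvHits p).foldl pvMinStep none = pvSel p := by
  unfold pvSel
  by_cases hc0 : ["temp","thermal","ect","egt","iat","_t_","_t$"].any (fun x => PySem.Str.isIn x p) = true
  · simp only [if_pos hc0]
    refine pvFold_eq_of_min (pvHits p) ((0 : Int), "Temperature")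
      (pvHit_of_matched p 0 "Temperature" ["temp","thermal","ect","egt","iat","_t_","_t$"] (by decide) hc0) ?_
      (pvHit_uniq p 0 "Temperature" (by decide))
    intro h hh
    have n := pvPrio_nonneg p h hh
    omega
  by_cases hc1 : ["press","pres","map","boost","baro","_p_"].any (fun x => PySem.Str.isIn x p) = true
  · simp only [if_pos hc1, if_neg hc0]
    refine pvFold_eq_of_min (pvHits p) ((1 : Int), "Pressure")
      (pvHit_of_matched p 1 "Pressure" ["press","pres","map","boost","baro","_p_"] (by decide) hc1) ?_
      (pvHit_uniq p 1 "Pressure" (by decide))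
    intro h hh
    have n := pvPrio_nonneg p h hh
    have n0 := pvNo_hit_of_not_matched p 0 ["temp","thermal","ect","egt","iat","_t_","_t$"] (by decide) (eq_false_of_ne_true hc0) h hh
    omega
  by_cases hc2 : ["speed","rpm","ckp","cmp","freq"].any (fun x => PySem.Str.isIn x p) = true
  · simp only [if_pos hc2, if_neg hc0, if_neg hc1]
    refine pvFold_eq_of_min (pvHits p) ((2 : Int), "Speed/RPM")
      (pvHit_of_matched p 2 "Speed/RPM" ["speed","rpm","ckp","cmp","freq"] (by decide) hc2) ?_
      (pvHit_uniq p 2 "Speed/RPM" (by decide))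
    intro h hh
    have n := pvPrio_nonneg p h hh
    have n0 := pvNo_hit_of_not_matched p 0 ["temp","thermal","ect","egt","iat","_t_","_t$"] (by decide) (eq_false_of_ne_true hc0) h hh
    have n1 := pvNo_hit_of_not_matched p 1 ["press","pres","map","boost","baro","_p_"] (by decide) (eq_false_of_ne_true hc1) h hh
    omega
  by_cases hc3 : ["torque","load","trq"].any (fun x => PySem.Str.isIn x p) = true
  · simp only [if_pos hc3, if_neg hc0, if_neg hc1, if_neg hc2]
    refine pvFold_eq_of_min (pvHits p) ((3 : Int), "Torque/Load")
      (pvHit_of_matched p 3 "Torque/Load" ["torque","load","trq"] (by decide) hc3) ?_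
      (pvHit_uniq p 3 "Torque/Load" (by decide))
    intro h hh
    have n := pvPrio_nonneg p h hh
    have n0 := pvNo_hit_of_not_matched p 0 ["temp","thermal","ect","egt","iat","_t_","_t$"] (by decide) (eq_false_of_ne_true hc0) h hh
    have n1 := pvNo_hit_of_not_matched p 1 ["press","pres","map","boost","baro","_p_"] (by decide) (eq_false_of_ne_true hc1) h hh
    have n2 := pvNo_hit_of_not_matched p 2 ["speed","rpm","ckp","cmp","freq"] (by decide) (eq_false_of_ne_true hc2) h hh
    omega
  by_cases hc4 : ["flow","maf","rate","mass"].any (fun x => PySem.Str.isIn x p) = true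
  · simp only [if_pos hc4, if_neg hc0, if_neg hc1, if_neg hc2, if_neg hc3]
    refine pvFold_eq_of_min (pvHits p) ((4 : Int), "Flow/Rate")
      (pvHit_of_matched p 4 "Flow/Rate" ["flow","maf","rate","mass"] (by decide) hc4) ?_
      (pvHit_uniq p 4 "Flow/Rate" (by decide))
    intro h hh
    have n := pvPrio_nonneg p h hh
    have n0 := pvNo_hit_of_not_matched p 0 ["temp","thermal","ect","egt","iat","_t_","_t$"] (by decide) (eq_false_of_ne_true hc0) h hh
    have n1 := pvNo_hit_of_not_matched p 1 ["press","pres","map","boost","baro","_p_"] (by decide) (eq_false_of_ne_true hc1) h hh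
    have n2 := pvNo_hit_of_not_matched p 2 ["speed","rpm","ckp","cmp","freq"] (by decide) (eq_false_of_ne_true hc2) h hh
    have n3 := pvNo_hit_of_not_matched p 3 ["torque","load","trq"] (by decide) (eq_false_of_ne_true hc3) h hh
    omega
  by_cases hc5 : ["volt","current","power","elec","batt"].any (fun x => PySem.Str.isIn x p) = true
  · simp only [if_pos hc5, if_neg hc0, if_neg hc1, if_neg hc2, if_neg hc3, if_neg hc4]
    refine pvFold_eq_of_min (pvHits p) ((5 : Int), "Electrical")
      (pvHit_of_matched p 5 "Electrical" ["volt","current","power","elec","batt"] (by decide) hc5) ?_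
      (pvHit_uniq p 5 "Electrical" (by decide))
    intro h hh
    have n := pvPrio_nonneg p h hh
    have n0 := pvNo_hit_of_not_matched p 0 ["temp","thermal","ect","egt","iat","_t_","_t$"] (by decide) (eq_false_of_ne_true hc0) h hh
    have n1 := pvNo_hit_of_not_matched p 1 ["press","pres","map","boost","baro","_p_"] (by decide) (eq_false_of_ne_true hc1) h hh
    have n2 := pvNo_hit_of_not_matched p 2 ["speed","rpm","ckp","cmp","freq"] (by decide) (eq_false_of_ne_true hc2) h hh
    have n3 := pvNo_hit_of_not_matched p 3 ["torque","load","trq"] (by decide) (eq_false_of_ne_true hc3) h hh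
    have n4 := pvNo_hit_of_not_matched p 4 ["flow","maf","rate","mass"] (by decide) (eq_false_of_ne_true hc4) h hh
    omega
  by_cases hc6 : ["nox","co2","hc","o2","soot","pm","emission","dpf","scr","urea"].any (fun x => PySem.Str.isIn x p) = true
  · simp only [if_pos hc6, if_neg hc0, if_neg hc1, if_neg hc2, if_neg hc3, if_neg hc4, if_neg hc5]
    refine pvFold_eq_of_min (pvHits p) ((6 : Int), "Emissions")
      (pvHit_of_matched p 6 "Emissions" ["nox","co2","hc","o2","soot","pm","emission","dpf","scr","urea"] (by decide) hc6) ?_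
      (pvHit_uniq p 6 "Emissions" (by decide))
    intro h hh
    have n := pvPrio_nonneg p h hh
    have n0 := pvNo_hit_of_not_matched p 0 ["temp","thermal","ect","egt","iat","_t_","_t$"] (by decide) (eq_false_of_ne_true hc0) h hh
    have n1 := pvNo_hit_of_not_matched p 1 ["press","pres","map","boost","baro","_p_"] (by decide) (eq_false_of_ne_true hc1) h hh
    have n2 := pvNo_hit_of_not_matched p 2 ["speed","rpm","ckp","cmp","freq"] (by decide) (eq_false_of_ne_true hc2) h hh
    have n3 := pvNo_hit_of_not_matched p 3 ["torque","load","trq"] (by decide) (eq_false_of_ne_true hc3) h hh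
    have n4 := pvNo_hit_of_not_matched p 4 ["flow","maf","rate","mass"] (by decide) (eq_false_of_ne_true hc4) h hh
    have n5 := pvNo_hit_of_not_matched p 5 ["volt","current","power","elec","batt"] (by decide) (eq_false_of_ne_true hc5) h hh
    omega
  by_cases hc7 : ["pos","tps","egr","valve","vgt","throttle"].any (fun x => PySem.Str.isIn x p) = true
  · simp only [if_pos hc7, if_neg hc0, if_neg hc1, if_neg hc2, if_neg hc3, if_neg hc4, if_neg hc5, if_neg hc6]
    refine pvFold_eq_of_min (pvHits p) ((7 : Int), "Position/Valve")
      (pvHit_of_matched p 7 "Position/Valve" ["pos","tps","egr","valve","vgt","throttle"] (by decide) hc7) ?_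
      (pvHit_uniq p 7 "Position/Valve" (by decide))
    intro h hh
    have n := pvPrio_nonneg p h hh
    have n0 := pvNo_hit_of_not_matched p 0 ["temp","thermal","ect","egt","iat","_t_","_t$"] (by decide) (eq_false_of_ne_true hc0) h hh
    have n1 := pvNo_hit_of_not_matched p 1 ["press","pres","map","boost","baro","_p_"] (by decide) (eq_false_of_ne_true hc1) h hh
    have n2 := pvNo_hit_of_not_matched p 2 ["speed","rpm","ckp","cmp","freq"] (by decide) (eq_false_of_ne_true hc2) h hh
    have n3 := pvNo_hit_of_not_matched p 3 ["torque","load","trq"] (by decide) (eq_false_of_ne_true hc3) h hh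
    have n4 := pvNo_hit_of_not_matched p 4 ["flow","maf","rate","mass"] (by decide) (eq_false_of_ne_true hc4) h hh
    have n5 := pvNo_hit_of_not_matched p 5 ["volt","current","power","elec","batt"] (by decide) (eq_false_of_ne_true hc5) h hh
    have n6 := pvNo_hit_of_not_matched p 6 ["nox","co2","hc","o2","soot","pm","emission","dpf","scr","urea"] (by decide) (eq_false_of_ne_true hc6) h hh
    omega
  by_cases hc8 : ["fuel","inj","rail"].any (fun x => PySem.Str.isIn x p) = true
  · simp only [if_pos hc8, if_neg hc0, if_neg hc1, if_neg hc2, if_neg hc3, if_neg hc4, if_neg hc5, if_neg hc6, if_neg hc7]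
    refine pvFold_eq_of_min (pvHits p) ((8 : Int), "Fuel System")
      (pvHit_of_matched p 8 "Fuel System" ["fuel","inj","rail"] (by decide) hc8) ?_
      (pvHit_uniq p 8 "Fuel System" (by decide))
    intro h hh
    have n := pvPrio_nonneg p h hh
    have n0 := pvNo_hit_of_not_matched p 0 ["temp","thermal","ect","egt","iat","_t_","_t$"] (by decide) (eq_false_of_ne_true hc0) h hh
    have n1 := pvNo_hit_of_not_matched p 1 ["press","pres","map","boost","baro","_p_"] (by decide) (eq_false_of_ne_true hc1) h hh
    have n2 := pvNo_hit_of_not_matched p 2 ["speed","rpm","ckp","cmp","freq"] (by decide) (eq_false_of_ne_true hc2) h hh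
    have n3 := pvNo_hit_of_not_matched p 3 ["torque","load","trq"] (by decide) (eq_false_of_ne_true hc3) h hh
    have n4 := pvNo_hit_of_not_matched p 4 ["flow","maf","rate","mass"] (by decide) (eq_false_of_ne_true hc4) h hh
    have n5 := pvNo_hit_of_not_matched p 5 ["volt","current","power","elec","batt"] (by decide) (eq_false_of_ne_true hc5) h hh
    have n6 := pvNo_hit_of_not_matched p 6 ["nox","co2","hc","o2","soot","pm","emission","dpf","scr","urea"] (by decide) (eq_false_of_ne_true hc6) h hh
    have n7 := pvNo_hit_of_not_matched p 7 ["pos","tps","egr","valve","vgt","throttle"] (by decide) (eq_false_of_ne_true hc7) h hh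
    omega
  by_cases hc9 : ["knock","det"].any (fun x => PySem.Str.isIn x p) = true
  · simp only [if_pos hc9, if_neg hc0, if_neg hc1, if_neg hc2, if_neg hc3, if_neg hc4, if_neg hc5, if_neg hc6, if_neg hc7, if_neg hc8]
    refine pvFold_eq_of_min (pvHits p) ((9 : Int), "Knock")
      (pvHit_of_matched p 9 "Knock" ["knock","det"] (by decide) hc9) ?_
      (pvHit_uniq p 9 "Knock" (by decide))
    intro h hh
    have n := pvPrio_nonneg p h hh
    have n0 := pvNo_hit_of_not_matched p 0 ["temp","thermal","ect","egt","iat","_t_","_t$"] (by decide) (eq_false_of_ne_true hc0) h hh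
    have n1 := pvNo_hit_of_not_matched p 1 ["press","pres","map","boost","baro","_p_"] (by decide) (eq_false_of_ne_true hc1) h hh
    have n2 := pvNo_hit_of_not_matched p 2 ["speed","rpm","ckp","cmp","freq"] (by decide) (eq_false_of_ne_true hc2) h hh
    have n3 := pvNo_hit_of_not_matched p 3 ["torque","load","trq"] (by decide) (eq_false_of_ne_true hc3) h hh
    have n4 := pvNo_hit_of_not_matched p 4 ["flow","maf","rate","mass"] (by decide) (eq_false_of_ne_true hc4) h hh
    have n5 := pvNo_hit_of_not_matched p 5 ["volt","current","power","elec","batt"] (by decide) (eq_false_of_ne_true hc5) h hh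
    have n6 := pvNo_hit_of_not_matched p 6 ["nox","co2","hc","o2","soot","pm","emission","dpf","scr","urea"] (by decide) (eq_false_of_ne_true hc6) h hh
    have n7 := pvNo_hit_of_not_matched p 7 ["pos","tps","egr","valve","vgt","throttle"] (by decide) (eq_false_of_ne_true hc7) h hh
    have n8 := pvNo_hit_of_not_matched p 8 ["fuel","inj","rail"] (by decide) (eq_false_of_ne_true hc8) h hh
    omega
  by_cases hc10 : ["lambda","afr","air"].any (fun x => PySem.Str.isIn x p) = true
  · simp only [if_pos hc10, if_neg hc0, if_neg hc1, if_neg hc2, if_neg hc3, if_neg hc4, if_neg hc5, if_neg hc6, if_neg hc7, if_neg hc8, if_neg hc9]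
    refine pvFold_eq_of_min (pvHits p) ((10 : Int), "Air/Fuel")
      (pvHit_of_matched p 10 "Air/Fuel" ["lambda","afr","air"] (by decide) hc10) ?_
      (pvHit_uniq p 10 "Air/Fuel" (by decide))
    intro h hh
    have n := pvPrio_nonneg p h hh
    have n0 := pvNo_hit_of_not_matched p 0 ["temp","thermal","ect","egt","iat","_t_","_t$"] (by decide) (eq_false_of_ne_true hc0) h hh
    have n1 := pvNo_hit_of_not_matched p 1 ["press","pres","map","boost","baro","_p_"] (by decide) (eq_false_of_ne_true hc1) h hh
    have n2 := pvNo_hit_of_not_matched p 2 ["speed","rpm","ckp","cmp","freq"] (by decide) (eq_false_of_ne_true hc2) h hh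
    have n3 := pvNo_hit_of_not_matched p 3 ["torque","load","trq"] (by decide) (eq_false_of_ne_true hc3) h hh
    have n4 := pvNo_hit_of_not_matched p 4 ["flow","maf","rate","mass"] (by decide) (eq_false_of_ne_true hc4) h hh
    have n5 := pvNo_hit_of_not_matched p 5 ["volt","current","power","elec","batt"] (by decide) (eq_false_of_ne_true hc5) h hh
    have n6 := pvNo_hit_of_not_matched p 6 ["nox","co2","hc","o2","soot","pm","emission","dpf","scr","urea"] (by decide) (eq_false_of_ne_true hc6) h hh
    have n7 := pvNo_hit_of_not_matched p 7 ["pos","tps","egr","valve","vgt","throttle"] (by decide) (eq_false_of_ne_true hc7) h hh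
    have n8 := pvNo_hit_of_not_matched p 8 ["fuel","inj","rail"] (by decide) (eq_false_of_ne_true hc8) h hh
    have n9 := pvNo_hit_of_not_matched p 9 ["knock","det"] (by decide) (eq_false_of_ne_true hc9) h hh
    omega
  by_cases hc11 : ["cool","water","oil","lube"].any (fun x => PySem.Str.isIn x p) = true
  · simp only [if_pos hc11, if_neg hc0, if_neg hc1, if_neg hc2, if_neg hc3, if_neg hc4, if_neg hc5, if_neg hc6, if_neg hc7, if_neg hc8, if_neg hc9, if_neg hc10]
    refine pvFold_eq_of_min (pvHits p) ((11 : Int), "Cooling/Lubrication")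
      (pvHit_of_matched p 11 "Cooling/Lubrication" ["cool","water","oil","lube"] (by decide) hc11) ?_
      (pvHit_uniq p 11 "Cooling/Lubrication" (by decide))
    intro h hh
    have n := pvPrio_nonneg p h hh
    have n0 := pvNo_hit_of_not_matched p 0 ["temp","thermal","ect","egt","iat","_t_","_t$"] (by decide) (eq_false_of_ne_true hc0) h hh
    have n1 := pvNo_hit_of_not_matched p 1 ["press","pres","map","boost","baro","_p_"] (by decide) (eq_false_of_ne_true hc1) h hh
    have n2 := pvNo_hit_of_not_matched p 2 ["speed","rpm","ckp","cmp","freq"] (by decide) (eq_false_of_ne_true hc2) h hh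
    have n3 := pvNo_hit_of_not_matched p 3 ["torque","load","trq"] (by decide) (eq_false_of_ne_true hc3) h hh
    have n4 := pvNo_hit_of_not_matched p 4 ["flow","maf","rate","mass"] (by decide) (eq_false_of_ne_true hc4) h hh
    have n5 := pvNo_hit_of_not_matched p 5 ["volt","current","power","elec","batt"] (by decide) (eq_false_of_ne_true hc5) h hh
    have n6 := pvNo_hit_of_not_matched p 6 ["nox","co2","hc","o2","soot","pm","emission","dpf","scr","urea"] (by decide) (eq_false_of_ne_true hc6) h hh
    have n7 := pvNo_hit_of_not_matched p 7 ["pos","tps","egr","valve","vgt","throttle"] (by decide) (eq_false_of_ne_true hc7) h hh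
    have n8 := pvNo_hit_of_not_matched p 8 ["fuel","inj","rail"] (by decide) (eq_false_of_ne_true hc8) h hh
    have n9 := pvNo_hit_of_not_matched p 9 ["knock","det"] (by decide) (eq_false_of_ne_true hc9) h hh
    have n10 := pvNo_hit_of_not_matched p 10 ["lambda","afr","air"] (by decide) (eq_false_of_ne_true hc10) h hh
    omega
  -- no category matches: the hit list is empty
  have hnil : pvHits p = [] := by
    rw [List.eq_nil_iff_forall_not_mem]
    intro h hh
    have n := pvPrio_nonneg p h hh
    have nl := pvPrio_lt12 p h hh
    have n0 := pvNo_hit_of_not_matched p 0 ["temp","thermal","ect","egt","iat","_t_","_t$"] (by decide) (eq_false_of_ne_true hc0) h hh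
    have n1 := pvNo_hit_of_not_matched p 1 ["press","pres","map","boost","baro","_p_"] (by decide) (eq_false_of_ne_true hc1) h hh
    have n2 := pvNo_hit_of_not_matched p 2 ["speed","rpm","ckp","cmp","freq"] (by decide) (eq_false_of_ne_true hc2) h hh
    have n3 := pvNo_hit_of_not_matched p 3 ["torque","load","trq"] (by decide) (eq_false_of_ne_true hc3) h hh
    have n4 := pvNo_hit_of_not_matched p 4 ["flow","maf","rate","mass"] (by decide) (eq_false_of_ne_true hc4) h hh
    have n5 := pvNo_hit_of_not_matched p 5 ["volt","current","power","elec","batt"] (by decide) (eq_false_of_ne_true hc5) h hh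
    have n6 := pvNo_hit_of_not_matched p 6 ["nox","co2","hc","o2","soot","pm","emission","dpf","scr","urea"] (by decide) (eq_false_of_ne_true hc6) h hh
    have n7 := pvNo_hit_of_not_matched p 7 ["pos","tps","egr","valve","vgt","throttle"] (by decide) (eq_false_of_ne_true hc7) h hh
    have n8 := pvNo_hit_of_not_matched p 8 ["fuel","inj","rail"] (by decide) (eq_false_of_ne_true hc8) h hh
    have n9 := pvNo_hit_of_not_matched p 9 ["knock","det"] (by decide) (eq_false_of_ne_true hc9) h hh
    have n10 := pvNo_hit_of_not_matched p 10 ["lambda","afr","air"] (by decide) (eq_false_of_ne_true hc10) h hh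
    have n11 := pvNo_hit_of_not_matched p 11 ["cool","water","oil","lube"] (by decide) (eq_false_of_ne_true hc11) h hh
    omega
  simp only [if_neg hc0, if_neg hc1, if_neg hc2, if_neg hc3, if_neg hc4, if_neg hc5, if_neg hc6, if_neg hc7, if_neg hc8, if_neg hc9, if_neg hc10, if_neg hc11]
  rw [hnil]
  rfl

-- ===== VERDICT =====
theorem categorize_parameter_spec : Claim_equal_categorize_parameter := by
  intro name _
  unfold Spec_categorize_parameter
  simp only [categorize_parameter, categorize_parameter_alt]
  rw [pvNested_eq, pvMain]
  unfold pvSel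
  set p := PySem.Str.lower name with hp
  by_cases hc0 : ["temp","thermal","ect","egt","iat","_t_","_t$"].any (fun x => PySem.Str.isIn x p) = true
  · simp only [if_pos hc0]
  by_cases hc1 : ["press","pres","map","boost","baro","_p_"].any (fun x => PySem.Str.isIn x p) = true
  · simp only [if_pos hc1, if_neg hc0]
  by_cases hc2 : ["speed","rpm","ckp","cmp","freq"].any (fun x => PySem.Str.isIn x p) = true
  · simp only [if_pos hc2, if_neg hc0, if_neg hc1]
  by_cases hc3 : ["torque","load","trq"].any (fun x => PySem.Str.isIn x p) = true
  · simp only [if_pos hc3, if_neg hc0, if_neg hc1, if_neg hc2]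
  by_cases hc4 : ["flow","maf","rate","mass"].any (fun x => PySem.Str.isIn x p) = true
  · simp only [if_pos hc4, if_neg hc0, if_neg hc1, if_neg hc2, if_neg hc3]
  by_cases hc5 : ["volt","current","power","elec","batt"].any (fun x => PySem.Str.isIn x p) = true
  · simp only [if_pos hc5, if_neg hc0, if_neg hc1, if_neg hc2, if_neg hc3, if_neg hc4]
  by_cases hc6 : ["nox","co2","hc","o2","soot","pm","emission","dpf","scr","urea"].any (fun x => PySem.Str.isIn x p) = true
  · simp only [if_pos hc6, if_neg hc0, if_neg hc1, if_neg hc2, if_neg hc3, if_neg hc4, if_neg hc5]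
  by_cases hc7 : ["pos","tps","egr","valve","vgt","throttle"].any (fun x => PySem.Str.isIn x p) = true
  · simp only [if_pos hc7, if_neg hc0, if_neg hc1, if_neg hc2, if_neg hc3, if_neg hc4, if_neg hc5, if_neg hc6]
  by_cases hc8 : ["fuel","inj","rail"].any (fun x => PySem.Str.isIn x p) = true
  · simp only [if_pos hc8, if_neg hc0, if_neg hc1, if_neg hc2, if_neg hc3, if_neg hc4, if_neg hc5, if_neg hc6, if_neg hc7]
  by_cases hc9 : ["knock","det"].any (fun x => PySem.Str.isIn x p) = true
  · simp only [if_pos hc9, if_neg hc0, if_neg hc1, if_neg hc2, if_neg hc3, if_neg hc4, if_neg hc5, if_neg hc6, if_neg hc7, if_neg hc8]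
  by_cases hc10 : ["lambda","afr","air"].any (fun x => PySem.Str.isIn x p) = true
  · simp only [if_pos hc10, if_neg hc0, if_neg hc1, if_neg hc2, if_neg hc3, if_neg hc4, if_neg hc5, if_neg hc6, if_neg hc7, if_neg hc8, if_neg hc9]
  by_cases hc11 : ["cool","water","oil","lube"].any (fun x => PySem.Str.isIn x p) = true
  · simp only [if_pos hc11, if_neg hc0, if_neg hc1, if_neg hc2, if_neg hc3, if_neg hc4, if_neg hc5, if_neg hc6, if_neg hc7, if_neg hc8, if_neg hc9, if_neg hc10]
  simp only [if_neg hc0, if_neg hc1, if_neg hc2, if_neg hc3, if_neg hc4, if_neg hc5, if_neg hc6, if_neg hc7, if_neg hc8, if_neg hc9, if_neg hc10, if_neg hc11]
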